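-- pv_equiv track=rewrite | github.com/FilipelIOn/Desafios_URI.Python | Contests/Contest #2 UFRPE/File-Name-Contest-UFRPE.py | verificador
-- ===== SOURCE A (Python) =====
-- find_xxx = lambda a: a.find("xxx")
--
-- def verificador(arq):
--     pos = find_xxx(arq)
--     if pos == -1:
--         return 0
--     else:
--         contador = 0
--         while True:
--             pos = find_xxx(arq)
--             if pos == -1:
--                 break
--             arq = arq[:pos] + arq[pos+1:]
--             contador += 1
--         return contador
-- ===== SOURCE B (Python) =====
-- def verificador(arq):
--     # Single pass over maximal runs of consecutive x: each run of length L
--     # needs max(0, L-2) removals; equivalently, count positions ending a triple.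
--     total = 0
--     run = 0
--     for c in arq:
--         if c == 'x':
--             run += 1
--             if run >= 3:
--                 total += 1
--         else:
--             run = 0
--     return total
-- ===== Notes on version B (the rewrite author's own statement) =====
-- stated objective: alternative
-- what changed: Replaces the repeated find-and-delete loop (each iteration rescans and rebuilds the string, quadratic in the number of deletions) with a single left-to-right pass that keeps the length of the current run of the letter x and counts one removal each time that run reaches three or more.
import Mathlib
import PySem

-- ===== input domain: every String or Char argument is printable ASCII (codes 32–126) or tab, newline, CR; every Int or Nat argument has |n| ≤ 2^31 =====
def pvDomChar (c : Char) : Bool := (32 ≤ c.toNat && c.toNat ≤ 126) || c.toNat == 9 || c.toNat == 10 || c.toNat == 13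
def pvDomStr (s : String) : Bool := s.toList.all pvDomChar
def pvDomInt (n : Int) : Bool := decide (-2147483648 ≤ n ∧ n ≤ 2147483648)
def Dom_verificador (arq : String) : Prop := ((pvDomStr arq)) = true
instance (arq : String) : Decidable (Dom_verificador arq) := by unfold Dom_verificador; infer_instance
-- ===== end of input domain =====

-- B replaces A's repeated find-and-delete rescans by one pass keeping the current run length of the letter x.

-- ===== PORT A =====
-- find_xxx = lambda a: a.find("xxx")   (strings handled as char lists, per PySem convention)
def find_xxx (a : List Char) : Int := PySem.Chars.find a "xxx".toList

-- termination fact for the while-loop: deleting the char at the found position shortens the list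
theorem pvLoopA_dec (arq : List Char) (h : ¬ find_xxx arq = -1) :
    (PySem.List.slice arq none (some (find_xxx arq)) ++
      PySem.List.slice arq (some (find_xxx arq + 1)) none).length < arq.length := by
  unfold find_xxx at *
  have h0 := PySem.Chars.neg_one_le_find arq "xxx".toList
  have hpos : 0 ≤ PySem.Chars.find arq "xxx".toList := by omega
  obtain ⟨hpre, -⟩ := PySem.Chars.find_spec hpos
  have hlen : (PySem.Chars.find arq "xxx".toList).toNat + 3 ≤ arq.length := by
    have h2 := hpre.length_le
    have h3 : "xxx".toList.length = 3 := by decide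
    simp only [List.length_drop, h3] at h2
    omega
  rw [PySem.List.slice_to arq hpos, PySem.List.slice_from arq (by omega)]
  simp only [List.length_append, List.length_take, List.length_drop]
  omega

-- while True: pos = find_xxx(arq); if pos == -1: break; arq = arq[:pos] + arq[pos+1:]; contador += 1
def pvLoopA (arq : List Char) (contador : Int) : Int :=
  let pos := find_xxx arq
  if h : pos = -1 then contador
  else pvLoopA (PySem.List.slice arq none (some pos) ++ PySem.List.slice arq (some (pos + 1)) none)
        (contador + 1)
termination_by arq.length
decreasing_by exact pvLoopA_dec arq h

def verificador (arq : String) : Int :=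
  let pos := find_xxx arq.toList
  if pos = -1 then 0
  else pvLoopA arq.toList 0

-- ===== PORT B =====
-- single pass: run = current streak length; count one removal each time the streak reaches 3
def pvStepB (st : Int × Int) (c : Char) : Int × Int :=
  if c = 'x' then
    let run := st.2 + 1
    (st.1 + (if 3 ≤ run then 1 else 0), run)
  else (st.1, 0)

def verificador_alt (arq : String) : Int :=
  (arq.toList.foldl pvStepB ((0 : Int), (0 : Int))).1

-- ===== PRECONDITION & SPEC =====
def Spec_verificador (arq : String) (out : Int) : Prop := out = verificador_alt arq
instance (arq : String) (out : Int) : Decidable (Spec_verificador arq out) := by unfold Spec_verificador; infer_instance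

-- ===== CLAIM (what is proved, stated in full; the proofs are below) =====
def Claim_equal_verificador : Prop := ∀ (arq : String), Dom_verificador arq → Spec_verificador arq (verificador arq)

-- ===== LEMMAS AND PROOFS =====

-- number of overlapping three-in-a-row windows; equals the sum over maximal runs of max 0 (L-2)
def triples : List Char → Int
  | a :: b :: c :: t => (if a = 'x' ∧ b = 'x' ∧ c = 'x' then 1 else 0) + triples (b :: c :: t)
  | _ => 0

theorem triples_cons3 (a b c : Char) (t : List Char) :
    triples (a :: b :: c :: t) =
      (if a = 'x' ∧ b = 'x' ∧ c = 'x' then 1 else 0) + triples (b :: c :: t) := rfl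

theorem triples_cons_ne (c : Char) (hc : c ≠ 'x') (s : List Char) :
    triples (c :: s) = triples s := by
  cases s with
  | nil => rfl
  | cons b u => cases u with
    | nil => rfl
    | cons d v => rw [triples_cons3]; simp [hc]

theorem triples_x_cons_ne (c : Char) (hc : c ≠ 'x') (s : List Char) :
    triples ('x' :: c :: s) = triples s := by
  cases s with
  | nil => rfl
  | cons d v => rw [triples_cons3]; simp [hc, triples_cons_ne c hc (d :: v)]

theorem triples_xx_cons_ne (c : Char) (hc : c ≠ 'x') (s : List Char) :
    triples ('x' :: 'x' :: c :: s) = triples s := by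
  rw [triples_cons3]; simp [hc, triples_x_cons_ne c hc s]

theorem triples_eq_zero_of_not_infix (s : List Char)
    (h : ¬ (['x','x','x'] <:+: s)) : triples s = 0 := by
  induction s using triples.induct with
  | case1 a b c t ih =>
    have hw : ¬ (a = 'x' ∧ b = 'x' ∧ c = 'x') := by
      rintro ⟨rfl, rfl, rfl⟩
      exact h ⟨[], t, rfl⟩
    have ht : ¬ (['x','x','x'] <:+: b :: c :: t) :=
      fun hinf => h (hinf.trans (List.suffix_cons a _).isInfix)
    simp [triples_cons3, hw, ih ht]
  | case2 s h2 => cases s with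
    | nil => rfl
    | cons a t => cases t with
      | nil => rfl
      | cons b u => cases u with
        | nil => rfl
        | cons c v => exact absurd rfl (h2 a b c v)

theorem triples_delete (p : Nat) (s : List Char)
    (h : ['x','x','x'] <+: s.drop p) :
    triples s = 1 + triples (s.take p ++ s.drop (p + 1)) := by
  induction p generalizing s with
  | zero =>
    obtain ⟨t, ht⟩ := h
    simp at ht
    subst ht
    norm_num [triples_cons3]
  | succ p ih =>
    cases s with
    | nil => simp at h
    | cons c s2 =>
      simp only [List.drop_succ_cons] at h
      have ihs := ih s2 h
      cases p with
      | zero =>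
        obtain ⟨t, ht⟩ := h
        simp at ht
        subst ht
        norm_num [triples_cons3]
        split_ifs <;> omega
      | succ q =>
        cases s2 with
        | nil => simp at h
        | cons d s3 =>
          cases q with
          | zero =>
            simp only [List.drop_succ_cons] at h
            obtain ⟨t, ht⟩ := h
            simp at ht
            subst ht
            norm_num [triples_cons3]
            split_ifs <;> omega
          | succ r =>
            cases s3 with
            | nil => simp at h
            | cons e s4 =>
              -- here s = c :: d :: e :: s4 and the deleted position lies inside s4
              simp only [List.take_succ_cons, List.drop_succ_cons, List.cons_append] at ihs ⊢
              rw [triples_cons3, triples_cons3]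
              split_ifs <;> omega

theorem pvLoopA_eq (n : Nat) : ∀ (s : List Char), s.length ≤ n → ∀ (c : Int),
    pvLoopA s c = c + triples s := by
  induction n with
  | zero =>
    intro s hs c
    have hsnil : s = [] := List.eq_nil_of_length_eq_zero (by omega)
    subst hsnil
    have hnil : find_xxx [] = -1 := by decide
    rw [pvLoopA]
    simp [hnil, triples]
  | succ n ih =>
    intro s hs c
    rw [pvLoopA]
    by_cases h : find_xxx s = -1
    · have hz : triples s = 0 := by
        apply triples_eq_zero_of_not_infix
        have := (PySem.Chars.find_eq_neg_one_iff s "xxx".toList).mp h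
        simpa using this
      simp [h, hz]
    · rw [dif_neg h]
      have hpos : 0 ≤ find_xxx s := by
        have := PySem.Chars.neg_one_le_find s "xxx".toList
        unfold find_xxx at *
        omega
      obtain ⟨hpre, -⟩ := PySem.Chars.find_spec (s := s) (sub := "xxx".toList) hpos
      have hlt := pvLoopA_dec s h
      rw [PySem.List.slice_to s hpos, PySem.List.slice_from s (by omega)] at hlt ⊢
      have h1 : (find_xxx s + 1).toNat = (find_xxx s).toNat + 1 := by omega
      rw [h1] at hlt ⊢
      have hdel := triples_delete (find_xxx s).toNat s (by simpa [find_xxx] using hpre)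
      rw [ih _ (by omega) (c + 1)]
      omega

theorem foldB_eq (s : List Char) : ∀ (t : Int) (k : Nat),
    (s.foldl pvStepB (t, (k : Int))).1 = t + triples (List.replicate (min k 2) 'x' ++ s) := by
  induction s with
  | nil =>
    intro t k
    obtain h0 | h1 | h2 : min k 2 = 0 ∨ min k 2 = 1 ∨ min k 2 = 2 := by omega
    · simp [h0, triples]
    · simp [h1, triples]
    · simp [h2, triples, List.replicate]
  | cons c s ih =>
    intro t k
    by_cases hc : c = 'x'
    · subst hc
      rw [List.foldl_cons]
      have hstep : pvStepB (t, (k : Int)) 'x' =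
          (t + (if 3 ≤ (k : Int) + 1 then 1 else 0), (k : Int) + 1) := by
        simp [pvStepB]
      have hcast : ((k : Int) + 1) = ((k + 1 : Nat) : Int) := by push_cast; ring
      rw [hstep, hcast, ih]
      rcases k with _ | _ | m
      · norm_num [List.replicate]
      · norm_num [List.replicate]
      · have h2 : min (m + 1 + 1) 2 = 2 := by omega
        have h3 : min (m + 1 + 1 + 1) 2 = 2 := by omega
        rw [h2, h3]
        simp only [List.replicate, List.cons_append, List.nil_append, triples_cons3]
        have hif : (3 : Int) ≤ ((m + 1 + 1 + 1 : Nat) : Int) := by push_cast; omega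
        rw [if_pos hif]
        simp only [and_self, if_true]
        ring
    · rw [List.foldl_cons]
      have hstep : pvStepB (t, (k : Int)) c = (t, ((0 : Nat) : Int)) := by
        simp [pvStepB, hc]
      rw [hstep, ih]
      have hpad : triples (List.replicate (min k 2) 'x' ++ c :: s) = triples s := by
        obtain h0 | h1 | h2 : min k 2 = 0 ∨ min k 2 = 1 ∨ min k 2 = 2 := by omega
        · rw [h0]
          simpa using triples_cons_ne c hc s
        · rw [h1]
          simpa [List.replicate] using triples_x_cons_ne c hc s
        · rw [h2]
          simpa [List.replicate] using triples_xx_cons_ne c hc s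
      simp [hpad]

theorem alt_eq_triples (arq : String) : verificador_alt arq = triples arq.toList := by
  unfold verificador_alt
  have := foldB_eq arq.toList 0 0
  simpa using this

-- ===== VERDICT (by name: the statement is the Claim_ definition above) =====
theorem verificador_spec : Claim_equal_verificador := by
  intro arq _
  unfold Spec_verificador verificador
  rw [alt_eq_triples]
  by_cases h : find_xxx arq.toList = -1
  · have hz : triples arq.toList = 0 := by
      apply triples_eq_zero_of_not_infix
      have := (PySem.Chars.find_eq_neg_one_iff arq.toList "xxx".toList).mp h
      simpa using this
    simp [h, hz]
  · simp only [h, if_false]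
    have := pvLoopA_eq arq.toList.length arq.toList (le_refl _) 0
    simp [this]
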